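-- pv_equiv track=rewrite | github.com/mispython/AimanPython | Conv_Py/PBBELF.py | format_cacbrch
-- ===== SOURCE A (Python) =====
-- CACBRCH_MAP = {
--     'KL': [2, 18, 35, 38, 40, 41, 53, 66, 120, 124, 128, 129, 141, 148,
--            169, 170, 225, 226, 230, 232, 236, 248, 262, 267, 802, 812, 816, 818],
--     'CC': [3, 15, 19, 22, 26, 29, 36, 46, 56, 69, 83, 94, 96, 97, 701, 118, 122, 125,
--            131, 132, 136, 138, 145, 151, 155, 157, 162, 163, 270, 167, 168, 173, 178,
--            179, 195, 198, 180, 196, 197, 202, 220, 229, 241, 252, 280, 811, 815, 822,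
--            103, 821, 825, 269, 284, 285, 288, 289, 702],
--     'SJ': [27, 42, 60, 68, 88, 121, 154, 177, 204, 206, 255, 801, 826],
--     'PG': [6, 54, 107, 114, 126, 150, 159, 171, 205, 253, 265, 266, 808, 817],
--     'JB': [7, 37, 52, 59, 61, 79, 89, 105, 110, 147, 174, 176, 216, 217, 222, 286,
--            804, 805, 287, 290],
--     'KL2': [20, 25, 43, 78, 81, 92, 109, 127, 133, 135, 153, 199, 201, 203,
--             221, 240, 250, 268, 814, 820],
-- }
--
-- def format_cacbrch(branch_code: int) -> str:
--     """Format CAC branch code"""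
--     for key, branches in CACBRCH_MAP.items():
--         if branch_code in branches:
--             if key == 'KL':
--                 return '911'
--             elif key == 'CC':
--                 return '912'
--             elif key == 'KL2':
--                 return '913'
--             elif key == 'JB':
--                 return '914'
--             elif key == 'PG':
--                 return '915'
--             elif key == 'SJ':
--                 return '916'
--     return '000'
-- ===== SOURCE B (Python) =====
-- # Precomputed sorted table (branch number -> output code, first group wins),
-- # searched with hand-written binary search.
-- _TABLE = [
--     (2, '911'), (3, '912'), (6, '915'), (7, '914'), (15, '912'), (18, '911'),
--     (19, '912'), (20, '913'), (22, '912'), (25, '913'), (26, '912'), (27, '916'),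
--     (29, '912'), (35, '911'), (36, '912'), (37, '914'), (38, '911'), (40, '911'),
--     (41, '911'), (42, '916'), (43, '913'), (46, '912'), (52, '914'), (53, '911'),
--     (54, '915'), (56, '912'), (59, '914'), (60, '916'), (61, '914'), (66, '911'),
--     (68, '916'), (69, '912'), (78, '913'), (79, '914'), (81, '913'), (83, '912'),
--     (88, '916'), (89, '914'), (92, '913'), (94, '912'), (96, '912'), (97, '912'),
--     (103, '912'), (105, '914'), (107, '915'), (109, '913'), (110, '914'), (114, '915'),
--     (118, '912'), (120, '911'), (121, '916'), (122, '912'), (124, '911'), (125, '912'),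
--     (126, '915'), (127, '913'), (128, '911'), (129, '911'), (131, '912'), (132, '912'),
--     (133, '913'), (135, '913'), (136, '912'), (138, '912'), (141, '911'), (145, '912'),
--     (147, '914'), (148, '911'), (150, '915'), (151, '912'), (153, '913'), (154, '916'),
--     (155, '912'), (157, '912'), (159, '915'), (162, '912'), (163, '912'), (167, '912'),
--     (168, '912'), (169, '911'), (170, '911'), (171, '915'), (173, '912'), (174, '914'),
--     (176, '914'), (177, '916'), (178, '912'), (179, '912'), (180, '912'), (195, '912'),
--     (196, '912'), (197, '912'), (198, '912'), (199, '913'), (201, '913'), (202, '912'),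
--     (203, '913'), (204, '916'), (205, '915'), (206, '916'), (216, '914'), (217, '914'),
--     (220, '912'), (221, '913'), (222, '914'), (225, '911'), (226, '911'), (229, '912'),
--     (230, '911'), (232, '911'), (236, '911'), (240, '913'), (241, '912'), (248, '911'),
--     (250, '913'), (252, '912'), (253, '915'), (255, '916'), (262, '911'), (265, '915'),
--     (266, '915'), (267, '911'), (268, '913'), (269, '912'), (270, '912'), (280, '912'),
--     (284, '912'), (285, '912'), (286, '914'), (287, '914'), (288, '912'), (289, '912'),
--     (290, '914'), (701, '912'), (702, '912'), (801, '916'), (802, '911'), (804, '914'),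
--     (805, '914'), (808, '915'), (811, '912'), (812, '911'), (814, '913'), (815, '912'),
--     (816, '911'), (817, '915'), (818, '911'), (820, '913'), (821, '912'), (822, '912'),
--     (825, '912'), (826, '916'),
-- ]
--
-- def format_cacbrch(branch_code: int) -> str:
--     """Format CAC branch code"""
--     lo, hi = 0, len(_TABLE)
--     while lo < hi:
--         mid = (lo + hi) // 2
--         k, v = _TABLE[mid]
--         if k == branch_code:
--             return v
--         if k < branch_code:
--             lo = mid + 1
--         else:
--             hi = mid
--     return '000'
-- ===== Notes on version B (the rewrite author's own statement) =====
-- stated objective: alternative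
-- what changed: Replaced the per-call loop over the six groups with linear membership scans and an if/elif name cascade by a precomputed sorted (branch, code) table searched with binary search.
import Mathlib
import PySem

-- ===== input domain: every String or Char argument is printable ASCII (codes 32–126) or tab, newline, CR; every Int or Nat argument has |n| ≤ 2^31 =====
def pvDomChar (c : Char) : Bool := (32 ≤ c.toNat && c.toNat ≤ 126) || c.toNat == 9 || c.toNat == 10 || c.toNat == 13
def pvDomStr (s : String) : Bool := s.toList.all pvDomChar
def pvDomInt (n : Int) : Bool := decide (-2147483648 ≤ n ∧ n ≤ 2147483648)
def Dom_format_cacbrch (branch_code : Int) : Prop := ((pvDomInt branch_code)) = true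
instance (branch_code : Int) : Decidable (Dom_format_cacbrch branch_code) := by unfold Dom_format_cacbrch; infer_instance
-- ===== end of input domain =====

-- B replaces A's per-call scan of the six group lists and the if/elif name cascade by a
-- precomputed sorted (branch, code) table searched with binary search.

-- ===== PORT A =====
-- the module-level dict CACBRCH_MAP, as an association list in insertion order
def CACBRCH_MAP : List (String × List Int) :=
  [("KL", [2, 18, 35, 38, 40, 41, 53, 66, 120, 124, 128, 129, 141, 148,
           169, 170, 225, 226, 230, 232, 236, 248, 262, 267, 802, 812, 816, 818]),
   ("CC", [3, 15, 19, 22, 26, 29, 36, 46, 56, 69, 83, 94, 96, 97, 701, 118, 122, 125,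
           131, 132, 136, 138, 145, 151, 155, 157, 162, 163, 270, 167, 168, 173, 178,
           179, 195, 198, 180, 196, 197, 202, 220, 229, 241, 252, 280, 811, 815, 822,
           103, 821, 825, 269, 284, 285, 288, 289, 702]),
   ("SJ", [27, 42, 60, 68, 88, 121, 154, 177, 204, 206, 255, 801, 826]),
   ("PG", [6, 54, 107, 114, 126, 150, 159, 171, 205, 253, 265, 266, 808, 817]),
   ("JB", [7, 37, 52, 59, 61, 79, 89, 105, 110, 147, 174, 176, 216, 217, 222, 286,
           804, 805, 287, 290]),
   ("KL2", [20, 25, 43, 78, 81, 92, 109, 127, 133, 135, 153, 199, 201, 203,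
            221, 240, 250, 268, 814, 820])]

-- the 'for key, branches in CACBRCH_MAP.items():' loop; a branch of the cascade
-- that matches returns, otherwise the loop continues; after the loop: '000'
def formatLoop : List (String × List Int) → Int → String
  | [], _ => "000"
  | (key, branches) :: rest, branch_code =>
    if branches.contains branch_code then
      if key == "KL" then "911"
      else if key == "CC" then "912"
      else if key == "KL2" then "913"
      else if key == "JB" then "914"
      else if key == "PG" then "915"
      else if key == "SJ" then "916"
      else formatLoop rest branch_code
    else formatLoop rest branch_code

def format_cacbrch (branch_code : Int) : String :=
  formatLoop CACBRCH_MAP branch_code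

-- ===== PORT B =====
-- Source B's precomputed sorted table _TABLE (branch number -> output code)
def TABLE : List (Int × String) :=
  [(2, "911"), (3, "912"), (6, "915"), (7, "914"), (15, "912"), (18, "911"),
    (19, "912"), (20, "913"), (22, "912"), (25, "913"), (26, "912"), (27, "916"),
    (29, "912"), (35, "911"), (36, "912"), (37, "914"), (38, "911"), (40, "911"),
    (41, "911"), (42, "916"), (43, "913"), (46, "912"), (52, "914"), (53, "911"),
    (54, "915"), (56, "912"), (59, "914"), (60, "916"), (61, "914"), (66, "911"),
    (68, "916"), (69, "912"), (78, "913"), (79, "914"), (81, "913"), (83, "912"),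
    (88, "916"), (89, "914"), (92, "913"), (94, "912"), (96, "912"), (97, "912"),
    (103, "912"), (105, "914"), (107, "915"), (109, "913"), (110, "914"), (114, "915"),
    (118, "912"), (120, "911"), (121, "916"), (122, "912"), (124, "911"), (125, "912"),
    (126, "915"), (127, "913"), (128, "911"), (129, "911"), (131, "912"), (132, "912"),
    (133, "913"), (135, "913"), (136, "912"), (138, "912"), (141, "911"), (145, "912"),
    (147, "914"), (148, "911"), (150, "915"), (151, "912"), (153, "913"), (154, "916"),
    (155, "912"), (157, "912"), (159, "915"), (162, "912"), (163, "912"), (167, "912"),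
    (168, "912"), (169, "911"), (170, "911"), (171, "915"), (173, "912"), (174, "914"),
    (176, "914"), (177, "916"), (178, "912"), (179, "912"), (180, "912"), (195, "912"),
    (196, "912"), (197, "912"), (198, "912"), (199, "913"), (201, "913"), (202, "912"),
    (203, "913"), (204, "916"), (205, "915"), (206, "916"), (216, "914"), (217, "914"),
    (220, "912"), (221, "913"), (222, "914"), (225, "911"), (226, "911"), (229, "912"),
    (230, "911"), (232, "911"), (236, "911"), (240, "913"), (241, "912"), (248, "911"),
    (250, "913"), (252, "912"), (253, "915"), (255, "916"), (262, "911"), (265, "915"),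
    (266, "915"), (267, "911"), (268, "913"), (269, "912"), (270, "912"), (280, "912"),
    (284, "912"), (285, "912"), (286, "914"), (287, "914"), (288, "912"), (289, "912"),
    (290, "914"), (701, "912"), (702, "912"), (801, "916"), (802, "911"), (804, "914"),
    (805, "914"), (808, "915"), (811, "912"), (812, "911"), (814, "913"), (815, "912"),
    (816, "911"), (817, "915"), (818, "911"), (820, "913"), (821, "912"), (822, "912"),
    (825, "912"), (826, "916")]

-- Source B's while-loop binary search; _TABLE[mid] ported as getD (mid < hi ≤ length,
-- so the default is never used); the fuel argument only makes the recursion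
-- structural: hi - lo shrinks each step, so fuel = TABLE.length never runs out
def bsearch : Nat → Int → Nat → Nat → String
  | 0, _, _, _ => "000"
  | fuel + 1, branch_code, lo, hi =>
    if lo < hi then
      let mid := (lo + hi) / 2
      let kv := TABLE.getD mid (0, "")
      if kv.1 == branch_code then kv.2
      else if kv.1 < branch_code then bsearch fuel branch_code (mid + 1) hi
      else bsearch fuel branch_code lo mid
    else "000"

def format_cacbrch_alt (branch_code : Int) : String :=
  bsearch TABLE.length branch_code 0 TABLE.length

-- ===== PRECONDITION & SPEC =====
def Spec_format_cacbrch (branch_code : Int) (out : String) : Prop := out = format_cacbrch_alt branch_code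
instance (branch_code : Int) (out : String) : Decidable (Spec_format_cacbrch branch_code out) := by unfold Spec_format_cacbrch; infer_instance

-- ===== CLAIM (what is proved, stated in full; the proofs are below) =====
def Claim_equal_format_cacbrch : Prop := ∀ (branch_code : Int), Dom_format_cacbrch branch_code → Spec_format_cacbrch branch_code (format_cacbrch branch_code)

-- ===== LEMMAS AND PROOFS =====

-- all branch numbers occurring anywhere in CACBRCH_MAP
def allBranches : List Int := (CACBRCH_MAP.map Prod.snd).flatten

-- A and B agree on every listed branch number (finite check)
set_option maxRecDepth 100000 in
theorem agree_on_listed :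
    allBranches.all (fun n => format_cacbrch n == format_cacbrch_alt n) = true := by decide

-- every key of the sorted table occurs among the listed branch numbers (finite check)
set_option maxRecDepth 100000 in
theorem table_keys_listed :
    TABLE.all (fun p => allBranches.contains p.1) = true := by decide

-- binary search never finds a key absent from the table: every probe compares unequal
theorem bsearch_not_mem (n : Int) (h : ∀ p ∈ TABLE, p.1 ≠ n) :
    ∀ fuel lo hi, hi ≤ TABLE.length → bsearch fuel n lo hi = "000" := by
  intro fuel
  induction fuel with
  | zero => intro lo hi _; rfl
  | succ f ih =>
    intro lo hi hle
    unfold bsearch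
    split
    · rename_i hlt
      have hmid : (lo + hi) / 2 < TABLE.length := by omega
      have hmem : TABLE.getD ((lo + hi) / 2) (0, "") ∈ TABLE := by
        rw [List.getD_eq_getElem?_getD, List.getElem?_eq_getElem hmid]
        exact List.getElem_mem _
      have hne : (TABLE.getD ((lo + hi) / 2) (0, "")).1 ≠ n := h _ hmem
      simp only [beq_iff_eq, hne, if_false]
      split
      · exact ih _ _ hle
      · exact ih _ _ (by omega)
    · rfl

theorem format_cacbrch_spec : Claim_equal_format_cacbrch := by
  intro n _
  unfold Spec_format_cacbrch
  by_cases h : n ∈ allBranches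
  · have := agree_on_listed
    rw [List.all_eq_true] at this
    exact eq_of_beq (this n h)
  · -- n is in none of the six group lists
    have hkeys : ∀ p ∈ TABLE, p.1 ≠ n := by
      intro p hp hpn
      have := table_keys_listed
      rw [List.all_eq_true] at this
      have := this p hp
      rw [List.contains_iff_mem] at this
      exact h (hpn ▸ this)
    have hB : format_cacbrch_alt n = "000" :=
      bsearch_not_mem n hkeys TABLE.length 0 TABLE.length le_rfl
    simp only [allBranches, CACBRCH_MAP, List.map, List.flatten, List.append_eq,
      List.mem_append, List.not_mem_nil, or_false, not_or] at h
    obtain ⟨hKL, hCC, hSJ, hPG, hJB, hKL2⟩ := h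
    have contains_false : ∀ (l : List Int), n ∉ l → l.contains n = false := by
      intro l hl
      simpa using hl
    have hA : format_cacbrch n = "000" := by
      simp only [format_cacbrch, CACBRCH_MAP, formatLoop,
        contains_false _ hKL, contains_false _ hCC, contains_false _ hSJ,
        contains_false _ hPG, contains_false _ hJB, contains_false _ hKL2]
      simp
    rw [hA, hB]
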